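-- pv_equiv track=rewrite | github.com/GabrielFaustin0/md3 | repetidas_seguidas_25061.py | RepetidasSeguidas
-- ===== SOURCE A (Python) =====
-- def RepetidasSeguidas(x):
--     """
--     Recebe uma string com um texto que deve ser verificado para encontrar letras seguidas iguais
--     Parâmetro:
--         texto: string a verificar
--     Devolve:
--         True: se o texto contém letras seguidas iguais
--         False: se o texto não tem letras seguidas iguais
--     """
--     s=len(x)
--     x=x.lower()
--     s=s-1
--     for i in range(s):
--
--         if x[i]==x[i+1]:
--             return True
--     return False
-- ===== SOURCE B (Python) =====
-- def RepetidasSeguidas(x):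
--     s = x.lower()
--     comp = []
--     for ch in s:
--         if not comp or comp[-1] != ch:
--             comp.append(ch)
--     return len(comp) != len(s)
-- ===== Notes on version B (the rewrite author's own statement) =====
-- stated objective: alternative
-- what changed: Instead of testing each adjacent index pair with an early return, B builds the run-length compression of the lowercased text (keeping one representative per run of equal consecutive characters) and answers by comparing the compressed length with the original length.
import Mathlib
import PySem

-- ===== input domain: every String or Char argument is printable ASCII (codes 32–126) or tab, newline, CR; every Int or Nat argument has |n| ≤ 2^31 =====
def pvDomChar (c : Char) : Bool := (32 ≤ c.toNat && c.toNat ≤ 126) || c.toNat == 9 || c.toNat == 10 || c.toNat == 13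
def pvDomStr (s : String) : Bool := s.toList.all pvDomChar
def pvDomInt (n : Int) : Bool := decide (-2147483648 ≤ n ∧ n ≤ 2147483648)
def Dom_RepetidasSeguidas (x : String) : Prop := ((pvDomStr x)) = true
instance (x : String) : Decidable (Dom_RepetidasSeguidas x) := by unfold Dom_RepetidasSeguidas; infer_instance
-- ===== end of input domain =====

-- B replaces A's indexed adjacent-pair scan with early return by run-length compression:
-- it keeps one representative per run of equal consecutive characters and compares lengths (alternative; same cost).

-- ===== PORT A =====
-- the 'for i in range(s): if x[i]==x[i+1]: return True' loop, with early return
def RepetidasSeguidasLoop (cs : List Char) : List Int → Bool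
  | [] => false
  | i :: rest =>
    match PySem.List.pyGet? cs i, PySem.List.pyGet? cs (i + 1) with
    | some a, some b => if a == b then true else RepetidasSeguidasLoop cs rest
    | _, _ => false   -- IndexError (unreachable: i, i+1 < len for i in range(len-1))

def RepetidasSeguidas (x : String) : Bool :=
  let s : Int := PySem.Str.len x
  let x' : String := PySem.Str.lower x
  let s := s - 1
  RepetidasSeguidasLoop x'.toList (PySem.List.pyRange 0 s 1)

-- ===== PORT B =====
-- 'for ch in s: if not comp or comp[-1] != ch: comp.append(ch)'
def RepetidasSeguidas_alt (x : String) : Bool :=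
  let s := (PySem.Str.lower x).toList
  let comp := s.foldl
    (fun comp ch =>
      if comp.isEmpty || !(PySem.List.pyGet? comp (-1) == some ch) then comp ++ [ch] else comp)
    ([] : List Char)
  (comp.length : Int) != (s.length : Int)

-- ===== PRECONDITION & SPEC =====
def Spec_RepetidasSeguidas (x : String) (out : Bool) : Prop := out = RepetidasSeguidas_alt x
instance (x : String) (out : Bool) : Decidable (Spec_RepetidasSeguidas x out) := by unfold Spec_RepetidasSeguidas; infer_instance

-- ===== CLAIM (what is proved, stated in full; the proofs are below) =====
def Claim_equal_RepetidasSeguidas : Prop := ∀ (x : String), Dom_RepetidasSeguidas x → Spec_RepetidasSeguidas x (RepetidasSeguidas x)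

-- ===== LEMMAS AND PROOFS =====

-- adjacent-equal-pair predicate, the common characterisation of both ports
def pvAdj (l : List Char) : Bool :=
  match l with
  | a :: b :: t => a == b || pvAdj (b :: t)
  | _ => false

theorem pvAdj_short (l : List Char) (h : l.length ≤ 1) : pvAdj l = false := by
  match l, h with
  | [], _ => rfl
  | [a], _ => rfl

-- A's loop computes pvAdj of the suffix
theorem pvLoop_eq (cs : List Char) (k : Nat) (i : Nat) (hk : cs.length ≤ i + k) :
    RepetidasSeguidasLoop cs (PySem.List.pyRange (i : Int) ((cs.length : Int) - 1) 1)
      = pvAdj (cs.drop i) := by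
  induction k generalizing i with
  | zero =>
    rw [PySem.List.pyRange_one_eq_nil (by omega)]
    rw [pvAdj_short _ (by simp; omega)]
    rfl
  | succ k ih =>
    by_cases h : i + 1 < cs.length
    · rw [PySem.List.pyRange_one_cons (by omega)]
      have h1 : i < cs.length := by omega
      have e1 : PySem.List.pyGet? cs (i : Int) = some cs[i] := by
        simp [List.getElem?_eq_getElem h1]
      have e2 : PySem.List.pyGet? cs ((i : Int) + 1) = some cs[i + 1] := by
        have hc : ((i : Int) + 1) = ((i + 1 : Nat) : Int) := by push_cast; ring
        rw [hc, PySem.List.pyGet?_natCast]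
        exact List.getElem?_eq_getElem h
      have e3 : ((i : Int) + 1) = ((i + 1 : Nat) : Int) := by push_cast; ring
      have hdrop : cs.drop i = cs[i] :: cs.drop (i + 1) :=
        (List.getElem_cons_drop h1).symm
      have hdrop2 : cs.drop (i + 1) = cs[i + 1] :: cs.drop (i + 2) :=
        (List.getElem_cons_drop h).symm
      rw [RepetidasSeguidasLoop, e1, e2, e3, ih (i + 1) (by omega)]
      rw [hdrop, hdrop2]
      by_cases hab : cs[i] == cs[i + 1] <;> simp [pvAdj, hab, ← hdrop2]
    · rw [PySem.List.pyRange_one_eq_nil (by omega)]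
      rw [pvAdj_short _ (by simp; omega)]
      rfl

-- structural form of B's compression, parameterised by the previous run head
def pvDD : Option Char → List Char → List Char
  | _, [] => []
  | o, ch :: t => if o == some ch then pvDD o t else ch :: pvDD (some ch) t

-- B's foldl equals acc ++ pvDD of acc's last element
theorem pvFold_eq (l : List Char) (acc : List Char) :
    l.foldl
      (fun comp ch =>
        if comp.isEmpty || !(PySem.List.pyGet? comp (-1) == some ch) then comp ++ [ch] else comp)
      acc = acc ++ pvDD acc.getLast? l := by
  induction l generalizing acc with
  | nil => simp [pvDD]
  | cons ch t ih =>
    rw [List.foldl_cons]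
    by_cases he : acc = []
    · subst he
      simp only [List.isEmpty_nil, Bool.true_or, if_pos]
      rw [ih]
      simp [pvDD]
    · rw [show acc.isEmpty = false from by simp [he]]
      rw [PySem.List.pyGet?_neg_one]
      by_cases hl : acc.getLast? = some ch
      · rw [hl]
        simp only [beq_self_eq_true, Bool.not_true, Bool.or_false, Bool.false_eq_true, if_neg,
          not_false_eq_true]
        rw [ih, hl]
        simp [pvDD]
      · have hb : (acc.getLast? == some ch) = false := by simp [hl]
        rw [hb]
        simp only [Bool.not_false, Bool.or_true, if_pos]
        rw [ih]
        simp [List.getLast?_append, pvDD, hl]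

theorem pvDD_len_le (o : Option Char) (l : List Char) : (pvDD o l).length ≤ l.length := by
  induction l generalizing o with
  | nil => simp [pvDD]
  | cons ch t ih =>
    by_cases h : o == some ch <;> simp [pvDD, h]
    · exact Nat.le_succ_of_le (ih o)
    · exact ih (some ch)

-- compression preserves length iff there is no adjacent equal pair (given the run head)
theorem pvDD_len_eq_iff (c : Char) (l : List Char) :
    ((pvDD (some c) l).length = l.length) ↔ pvAdj (c :: l) = false := by
  induction l generalizing c with
  | nil => simp [pvDD, pvAdj]
  | cons ch t ih =>
    by_cases h : c = ch
    · subst h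
      have hle := pvDD_len_le (some c) t
      simp [pvDD, pvAdj]
      omega
    · simp [pvDD, pvAdj, h, ih]

theorem pvDD_none_len (l : List Char) :
    (((pvDD none l).length : Int) != (l.length : Int)) = pvAdj l := by
  cases l with
  | nil => simp [pvDD, pvAdj]
  | cons ch t =>
    have h1 : pvDD none (ch :: t) = ch :: pvDD (some ch) t := by simp [pvDD]
    rw [h1]
    rcases Bool.eq_false_or_eq_true (pvAdj (ch :: t)) with hadj | hadj
    · rw [hadj]
      have hne : (pvDD (some ch) t).length ≠ t.length := fun he => by
        rw [(pvDD_len_eq_iff ch t).mp he] at hadj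
        exact absurd hadj (by simp)
      simp only [List.length_cons, bne_iff_ne, ne_eq]
      simp
      omega
    · rw [hadj]
      have heq := (pvDD_len_eq_iff ch t).mpr hadj
      simp [heq]

-- ===== VERDICT (by name: the statement is the Claim_ definition above) =====
theorem RepetidasSeguidas_spec : Claim_equal_RepetidasSeguidas := by
  intro x _
  unfold Spec_RepetidasSeguidas
  simp only [RepetidasSeguidas, RepetidasSeguidas_alt]
  have hlen : PySem.Str.len x = ((PySem.Str.lower x).toList.length : Int) := by
    simp [PySem.Str.len_eq, PySem.Str.toList_lower, PySem.Chars.lower]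
  rw [hlen]
  have hA := pvLoop_eq (PySem.Str.lower x).toList ((PySem.Str.lower x).toList.length) 0 (by omega)
  simp only [Nat.cast_zero] at hA
  rw [hA, List.drop_zero, pvFold_eq]
  simp only [List.nil_append, List.getLast?_nil]
  exact (pvDD_none_len _).symm
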